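-- pv_equiv track=rewrite | github.com/chrisadoorn/commitextractor | src/java_parser/java_parser.py | compare_usage
-- ===== SOURCE A (Python) =====
-- def compare_usage(usage_list_vooraf: [str], usage_list_achteraf: [str]) -> (bool, bool, bool):
--     """
--     Het gebruik vooraf en achteraf is gelijk als dezelfde vorm van gebruik even vaak gebruikt wordt.
--     :param usage_list_vooraf: list of strings indicating usage in text before
--     :param usage_list_achteraf: list of strings indicating usage in text after
--     :return (bool, bool, bool): gebruik binnen vooraf ontbreekt in achteraf
--                                ,gebruik in achteraf ontbreekt in vooraf
--                                ,er is een wijziging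
--     """
--     if len(usage_list_vooraf) == 0 and len(usage_list_achteraf) == 0:
--         # beide leeg, dus geen wijziging
--         return False, False, False
--
--     work_vooraf = usage_list_vooraf.copy()
--     work_vooraf.sort()
--     work_achteraf = usage_list_achteraf.copy()
--     work_achteraf.sort()
--
--     vooraf_usage_ontbreekt = False
--     achteraf_nieuw_usage = False
--     vorige = ''
--     for vooraf in work_vooraf:
--         if vooraf != vorige:
--             vorige = vooraf
--             c_vorige = work_vooraf.count(vooraf)
--             c_nieuw = work_achteraf.count(vooraf)
--             vooraf_usage_ontbreekt = vooraf_usage_ontbreekt or (c_vorige > c_nieuw)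
--
--     vorige = ''
--     for achteraf in work_achteraf:
--         if achteraf != vorige:
--             vorige = achteraf
--             c_vorige = work_vooraf.count(achteraf)
--             c_nieuw = work_achteraf.count(achteraf)
--             achteraf_nieuw_usage = achteraf_nieuw_usage or (c_nieuw > c_vorige)
--
--     return (vooraf_usage_ontbreekt, achteraf_nieuw_usage, (vooraf_usage_ontbreekt or achteraf_nieuw_usage))
-- ===== SOURCE B (Python) =====
-- def compare_usage(usage_list_vooraf, usage_list_achteraf):
--     counts = {}
--     for x in usage_list_vooraf:
--         counts[x] = counts.get(x, 0) + 1
--     for x in usage_list_achteraf: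
--         counts[x] = counts.get(x, 0) - 1
--     missing = any(d > 0 for d in counts.values())
--     extra = any(d < 0 for d in counts.values())
--     return (missing, extra, missing or extra)
-- ===== Notes on version B (the rewrite author's own statement) =====
-- stated objective: faster
-- what changed: Replaces A's sort plus two dedup-scan loops with repeated list.count calls by one signed-difference dictionary built in a single pass over both lists, with the three flags read off the signs of its values.
-- intended difference: On inputs where the two lists contain the empty string a different number of times and no other string is imbalanced in the same direction, A returns False for the corresponding flag (its 'vorige' sentinel starts as '', so the sorted-to-front empty string is never checked) while B returns True, the intended 'usage changed' answer. — e.g. on compare_usage([""], []): A returns (false, false, false), B returns (true, false, true)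
import Mathlib
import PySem

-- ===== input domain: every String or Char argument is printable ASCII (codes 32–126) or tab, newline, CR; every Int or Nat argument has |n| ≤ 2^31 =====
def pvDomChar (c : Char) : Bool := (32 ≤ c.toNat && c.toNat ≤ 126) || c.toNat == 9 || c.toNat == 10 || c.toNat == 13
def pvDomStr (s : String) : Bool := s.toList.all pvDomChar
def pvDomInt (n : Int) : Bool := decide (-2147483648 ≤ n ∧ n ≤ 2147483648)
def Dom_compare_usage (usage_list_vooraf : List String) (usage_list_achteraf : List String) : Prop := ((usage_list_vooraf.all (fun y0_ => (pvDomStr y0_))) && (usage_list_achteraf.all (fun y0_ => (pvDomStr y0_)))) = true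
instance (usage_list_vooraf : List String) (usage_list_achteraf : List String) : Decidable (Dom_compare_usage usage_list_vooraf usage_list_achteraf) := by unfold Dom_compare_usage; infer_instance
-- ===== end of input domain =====

-- B replaces A's sort + two dedup-scan loops (each calling .count per distinct element) by one
-- signed-difference dictionary built in a single pass over both lists; a timing run
-- decides whether that is measurably faster. Proved: A = B outside D_, A ≠ B on all of D_.

-- ===== PORT A =====
def compare_usage (usage_list_vooraf : List String) (usage_list_achteraf : List String) : Bool × Bool × Bool :=
  if usage_list_vooraf.length = 0 ∧ usage_list_achteraf.length = 0 then (false, false, false)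
  else
    let work_vooraf := PySem.List.sorted usage_list_vooraf (fun x => x) false
    let work_achteraf := PySem.List.sorted usage_list_achteraf (fun x => x) false
    let s1 := work_vooraf.foldl (fun (s : Bool × String) vooraf =>
        if vooraf ≠ s.2 then
          (s.1 || decide (PySem.List.count work_achteraf vooraf < PySem.List.count work_vooraf vooraf), vooraf)
        else s) (false, "")
    let s2 := work_achteraf.foldl (fun (s : Bool × String) achteraf =>
        if achteraf ≠ s.2 then
          (s.1 || decide (PySem.List.count work_vooraf achteraf < PySem.List.count work_achteraf achteraf), achteraf)
        else s) (false, "")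
    (s1.1, s2.1, s1.1 || s2.1)

-- ===== PORT B =====
def compare_usage_alt (usage_list_vooraf : List String) (usage_list_achteraf : List String) : Bool × Bool × Bool :=
  let counts0 : PySem.Dict String Int :=
    usage_list_vooraf.foldl (fun d x => d.insert x (d.getD x 0 + 1)) PySem.Dict.empty
  let counts : PySem.Dict String Int :=
    usage_list_achteraf.foldl (fun d x => d.insert x (d.getD x 0 - 1)) counts0
  let missing := counts.values.any (fun d => decide (0 < d))
  let extra := counts.values.any (fun d => decide (d < 0))
  (missing, extra, missing || extra)

-- ===== PRECONDITION & SPEC =====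
-- On inputs where the two lists contain the empty string a different number of times and no other
-- string is imbalanced in the same direction, A returns False for the corresponding flag (its
-- 'vorige' sentinel starts as '', so the sorted-to-front empty string is never checked) while B
-- returns True, the intended 'usage changed' answer.
def D_compare_usage (usage_list_vooraf : List String) (usage_list_achteraf : List String) : Prop :=
  (usage_list_achteraf.count "" < usage_list_vooraf.count "" ∧
    ¬ ∃ x ∈ usage_list_vooraf, x ≠ "" ∧ usage_list_achteraf.count x < usage_list_vooraf.count x) ∨
  (usage_list_vooraf.count "" < usage_list_achteraf.count "" ∧
    ¬ ∃ x ∈ usage_list_achteraf, x ≠ "" ∧ usage_list_vooraf.count x < usage_list_achteraf.count x)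
instance (usage_list_vooraf : List String) (usage_list_achteraf : List String) : Decidable (D_compare_usage usage_list_vooraf usage_list_achteraf) := by unfold D_compare_usage; infer_instance

def Spec_compare_usage (usage_list_vooraf : List String) (usage_list_achteraf : List String) (out : Bool × Bool × Bool) : Prop := ¬ D_compare_usage usage_list_vooraf usage_list_achteraf → out = compare_usage_alt usage_list_vooraf usage_list_achteraf
instance (usage_list_vooraf : List String) (usage_list_achteraf : List String) (out : Bool × Bool × Bool) : Decidable (Spec_compare_usage usage_list_vooraf usage_list_achteraf out) := by unfold Spec_compare_usage; infer_instance

def pvDiffWitness_compare_usage : List String × List String := ([""], [])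
def pvDiffWitnessOut_compare_usage : (Bool × Bool × Bool) × (Bool × Bool × Bool) :=
  ((false, false, false), (true, false, true))

-- ===== CLAIM (what is proved, stated in full; the proofs are below) =====
def Claim_unchanged_compare_usage : Prop := ∀ (usage_list_vooraf : List String) (usage_list_achteraf : List String), Dom_compare_usage usage_list_vooraf usage_list_achteraf → Spec_compare_usage usage_list_vooraf usage_list_achteraf (compare_usage usage_list_vooraf usage_list_achteraf)
def Claim_changed_compare_usage : Prop := Dom_compare_usage (pvDiffWitness_compare_usage.1) (pvDiffWitness_compare_usage.2) ∧ D_compare_usage (pvDiffWitness_compare_usage.1) (pvDiffWitness_compare_usage.2) ∧ compare_usage (pvDiffWitness_compare_usage.1) (pvDiffWitness_compare_usage.2) = pvDiffWitnessOut_compare_usage.1 ∧ compare_usage_alt (pvDiffWitness_compare_usage.1) (pvDiffWitness_compare_usage.2) = pvDiffWitnessOut_compare_usage.2 ∧ pvDiffWitnessOut_compare_usage.1 ≠ pvDiffWitnessOut_compare_usage.2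
def Claim_exact_compare_usage : Prop := ∀ (usage_list_vooraf : List String) (usage_list_achteraf : List String), Dom_compare_usage usage_list_vooraf usage_list_achteraf → D_compare_usage usage_list_vooraf usage_list_achteraf → compare_usage usage_list_vooraf usage_list_achteraf ≠ compare_usage_alt usage_list_vooraf usage_list_achteraf

-- ===== LEMMAS AND PROOFS =====
lemma loopA_eq (pred : String → Bool) (l : List String) (b : Bool) (p : String)
    (hmin : ∀ x ∈ l, p ≤ x) (hpw : l.Pairwise (· ≤ ·)) :
    (l.foldl (fun s x => if x ≠ s.2 then (s.1 || pred x, x) else s) (b, p)).1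
      = (b || l.any (fun x => decide (x ≠ p) && pred x)) := by
  induction l generalizing b p with
  | nil => simp
  | cons x t ih =>
    have hpt : t.Pairwise (· ≤ ·) := hpw.of_cons
    have hxt : ∀ y ∈ t, x ≤ y := fun y hy => List.rel_of_pairwise_cons hpw hy
    by_cases hxp : x = p
    · subst hxp
      simp only [List.foldl_cons, ne_eq, not_true_eq_false, if_false, List.any_cons,
        decide_false, Bool.false_and, Bool.false_or]
      exact ih b x hxt hpt
    · have hpx : p < x := lt_of_le_of_ne (hmin x (List.mem_cons_self)) (Ne.symm hxp)
      have hne : ∀ y ∈ t, y ≠ p := fun y hy => ne_of_gt (lt_of_lt_of_le hpx (hxt y hy))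
      simp only [List.foldl_cons, ne_eq, hxp, not_false_eq_true, if_true, List.any_cons]
      rw [ih (b || pred x) x hxt hpt]
      rw [Bool.eq_iff_iff]
      simp only [Bool.or_eq_true, List.any_eq_true, Bool.and_eq_true, decide_eq_true_eq, ne_eq]
      constructor
      · rintro ((hb | hp) | ⟨y, hy, hyx, hyp⟩)
        · tauto
        · exact Or.inr (Or.inl ⟨trivial, hp⟩)
        · exact Or.inr (Or.inr ⟨y, hy, hne y hy, hyp⟩)
      · rintro (hb | (⟨_, hp⟩ | ⟨y, hy, hyp, hp⟩))
        · tauto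
        · tauto
        · by_cases hyx : y = x
          · subst hyx; tauto
          · exact Or.inr ⟨y, hy, hyx, hp⟩

lemma empty_string_le (s : String) : ("" : String) ≤ s := by
  by_contra h
  have h2 : s < "" := lt_of_not_ge h
  exact List.not_lt_nil s.toList (String.lt_iff_toList_lt.mp h2)



lemma sorted_count (v : List String) (x : String) :
    (PySem.List.sorted v (fun x => x) false).count x = v.count x :=
  (PySem.List.sorted_perm v (fun x => x) false).count_eq x

lemma A_fst_iff (v a : List String) :
    (compare_usage v a).1 = true ↔ ∃ x ∈ v, x ≠ "" ∧ a.count x < v.count x := by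
  unfold compare_usage
  by_cases h : v.length = 0 ∧ a.length = 0
  · rw [if_pos h]
    have hv : v = [] := List.length_eq_zero_iff.mp h.1
    subst hv; simp
  · rw [if_neg h]
    simp only
    rw [loopA_eq (fun x => decide (PySem.List.count (PySem.List.sorted a (fun x => x) false) x < PySem.List.count (PySem.List.sorted v (fun x => x) false) x))
          (PySem.List.sorted v (fun x => x) false) false ""
          (fun x _ => empty_string_le x)
          (PySem.List.sorted_pairwise v (fun x => x))]
    simp only [Bool.false_or, List.any_eq_true, Bool.and_eq_true, decide_eq_true_eq,
      PySem.List.mem_sorted, PySem.List.count_eq, sorted_count, ne_eq]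

lemma A_snd_iff (v a : List String) :
    (compare_usage v a).2.1 = true ↔ ∃ x ∈ a, x ≠ "" ∧ v.count x < a.count x := by
  unfold compare_usage
  by_cases h : v.length = 0 ∧ a.length = 0
  · rw [if_pos h]
    have ha : a = [] := List.length_eq_zero_iff.mp h.2
    subst ha; simp
  · rw [if_neg h]
    simp only
    rw [loopA_eq (fun x => decide (PySem.List.count (PySem.List.sorted v (fun x => x) false) x < PySem.List.count (PySem.List.sorted a (fun x => x) false) x))
          (PySem.List.sorted a (fun x => x) false) false ""
          (fun x _ => empty_string_le x)
          (PySem.List.sorted_pairwise a (fun x => x))]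
    simp only [Bool.false_or, List.any_eq_true, Bool.and_eq_true, decide_eq_true_eq,
      PySem.List.mem_sorted, PySem.List.count_eq, sorted_count, ne_eq]

lemma A_thd (v a : List String) :
    (compare_usage v a).2.2 = ((compare_usage v a).1 || (compare_usage v a).2.1) := by
  unfold compare_usage
  split <;> rfl

lemma getD_foldl_insert_sub_one (l : List String) (d : PySem.Dict String Int) (k : String) :
    (l.foldl (fun d x => d.insert x (d.getD x 0 - 1)) d).getD k 0 = d.getD k 0 - l.count k := by
  induction l generalizing d with
  | nil => simp
  | cons x t ih =>
    rw [List.foldl_cons, ih, PySem.Dict.getD_insert, List.count_cons]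
    by_cases hkx : k = x
    · subst hkx; simp; omega
    · simp [hkx, Ne.symm hkx]

lemma B_getD (v a : List String) (k : String) :
    (a.foldl (fun d x => d.insert x (d.getD x 0 - 1))
      (v.foldl (fun d x => d.insert x (d.getD x 0 + 1)) (PySem.Dict.empty : PySem.Dict String Int))).getD k 0
      = (v.count k : Int) - (a.count k : Int) := by
  rw [PySem.Dict.foldl_insert_getD_add_one_eq_counter, getD_foldl_insert_sub_one,
    PySem.Dict.getD_counter]

lemma B_keys (v a : List String) :
    (a.foldl (fun d x => d.insert x (d.getD x 0 - 1))
      (v.foldl (fun d x => d.insert x (d.getD x 0 + 1)) (PySem.Dict.empty : PySem.Dict String Int))).keys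
      = PySem.Set.update (PySem.Set.ofList v) a := by
  rw [PySem.Dict.foldl_insert_getD_add_one_eq_counter, PySem.Dict.keys_foldl_insert,
    PySem.Dict.keys_counter]

lemma B_nodup (v a : List String) :
    (a.foldl (fun d x => d.insert x (d.getD x 0 - 1))
      (v.foldl (fun d x => d.insert x (d.getD x 0 + 1)) (PySem.Dict.empty : PySem.Dict String Int))).keys.Nodup := by
  rw [PySem.Dict.foldl_insert_getD_add_one_eq_counter]
  exact PySem.Dict.nodup_keys_foldl_insert _ _ _ (PySem.Dict.nodup_keys_counter v)

lemma set_mem_update (y : String) (s xs : List String) :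
    y ∈ PySem.Set.update s xs ↔ y ∈ s ∨ y ∈ xs := by
  induction xs generalizing s with
  | nil => rw [PySem.Set.update_nil]; simp
  | cons x t ih =>
    rw [PySem.Set.update_cons, ih, PySem.Set.mem_add]
    simp only [List.mem_cons]
    tauto

lemma set_mem_ofList (y : String) (xs : List String) :
    y ∈ PySem.Set.ofList xs ↔ y ∈ xs := by
  rw [← PySem.Set.update_nil_left, set_mem_update]
  simp

lemma B_any_iff (v a : List String) (p : Int → Bool) :
    ((a.foldl (fun d x => d.insert x (d.getD x 0 - 1))
      (v.foldl (fun d x => d.insert x (d.getD x 0 + 1)) (PySem.Dict.empty : PySem.Dict String Int))).values.any p) = true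
      ↔ ∃ k, (k ∈ v ∨ k ∈ a) ∧ p ((v.count k : Int) - (a.count k : Int)) = true := by
  rw [PySem.Dict.values_eq_map_keys _ (B_nodup v a) 0, List.any_map]
  simp only [List.any_eq_true, Function.comp_apply]
  constructor
  · rintro ⟨k, hk, hp⟩
    rw [B_getD] at hp
    rw [B_keys] at hk
    refine ⟨k, ?_, hp⟩
    rcases (set_mem_update k _ _).mp hk with h | h
    · exact Or.inl (set_mem_ofList k v |>.mp h)
    · exact Or.inr h
  · rintro ⟨k, hk, hp⟩
    refine ⟨k, ?_, by rw [B_getD]; exact hp⟩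
    rw [B_keys]
    rcases hk with h | h
    · exact (set_mem_update k _ _).mpr (Or.inl (set_mem_ofList k v |>.mpr h))
    · exact (set_mem_update k _ _).mpr (Or.inr h)


lemma B_fst_iff (v a : List String) :
    (compare_usage_alt v a).1 = true ↔ ∃ x ∈ v, a.count x < v.count x := by
  show ((_ : PySem.Dict String Int).values.any _) = true ↔ _
  rw [B_any_iff]
  constructor
  · rintro ⟨k, hk, hp⟩
    simp only [decide_eq_true_eq] at hp
    have hc : a.count k < v.count k := by omega
    exact ⟨k, List.count_pos_iff.mp (by omega), hc⟩
  · rintro ⟨k, hk, hc⟩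
    exact ⟨k, Or.inl hk, by simp only [decide_eq_true_eq]; omega⟩

lemma B_snd_iff (v a : List String) :
    (compare_usage_alt v a).2.1 = true ↔ ∃ x ∈ a, v.count x < a.count x := by
  show ((_ : PySem.Dict String Int).values.any _) = true ↔ _
  rw [B_any_iff]
  constructor
  · rintro ⟨k, hk, hp⟩
    simp only [decide_eq_true_eq] at hp
    have hc : v.count k < a.count k := by omega
    exact ⟨k, List.count_pos_iff.mp (by omega), hc⟩
  · rintro ⟨k, hk, hc⟩
    exact ⟨k, Or.inr hk, by simp only [decide_eq_true_eq]; omega⟩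

lemma B_thd (v a : List String) :
    (compare_usage_alt v a).2.2 = ((compare_usage_alt v a).1 || (compare_usage_alt v a).2.1) := rfl


theorem main (v a : List String) (hnd : ¬ D_compare_usage v a) :
    compare_usage v a = compare_usage_alt v a := by
  unfold D_compare_usage at hnd
  rw [not_or] at hnd
  obtain ⟨hnd1, hnd2⟩ := hnd
  have h1 : (compare_usage v a).1 = (compare_usage_alt v a).1 := by
    rw [Bool.eq_iff_iff, A_fst_iff, B_fst_iff]
    constructor
    · rintro ⟨x, hx, _, hc⟩; exact ⟨x, hx, hc⟩
    · rintro ⟨x, hx, hc⟩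
      by_cases hx0 : x = ""
      · subst hx0
        rcases not_and.mp hnd1 hc |> not_not.mp with ⟨y, hy, hy0, hyc⟩
        exact ⟨y, hy, hy0, hyc⟩
      · exact ⟨x, hx, hx0, hc⟩
  have h2 : (compare_usage v a).2.1 = (compare_usage_alt v a).2.1 := by
    rw [Bool.eq_iff_iff, A_snd_iff, B_snd_iff]
    constructor
    · rintro ⟨x, hx, _, hc⟩; exact ⟨x, hx, hc⟩
    · rintro ⟨x, hx, hc⟩
      by_cases hx0 : x = ""
      · subst hx0
        rcases not_and.mp hnd2 hc |> not_not.mp with ⟨y, hy, hy0, hyc⟩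
        exact ⟨y, hy, hy0, hyc⟩
      · exact ⟨x, hx, hx0, hc⟩
  have h3 : (compare_usage v a).2.2 = (compare_usage_alt v a).2.2 := by
    rw [A_thd, B_thd, h1, h2]
  exact Prod.ext_iff.mpr ⟨h1, Prod.ext_iff.mpr ⟨h2, h3⟩⟩

theorem tight (v a : List String) (hd : D_compare_usage v a) :
    compare_usage v a ≠ compare_usage_alt v a := by
  intro heq
  rcases hd with ⟨hc, hne⟩ | ⟨hc, hne⟩
  · have hbf : (compare_usage_alt v a).1 = true :=
      (B_fst_iff v a).mpr ⟨"", List.count_pos_iff.mp (by omega), hc⟩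
    have haf : (compare_usage v a).1 ≠ true := fun h => hne ((A_fst_iff v a).mp h)
    exact haf (by rw [heq]; exact hbf)
  · have hbf : (compare_usage_alt v a).2.1 = true :=
      (B_snd_iff v a).mpr ⟨"", List.count_pos_iff.mp (by omega), hc⟩
    have haf : (compare_usage v a).2.1 ≠ true := fun h => hne ((A_snd_iff v a).mp h)
    exact haf (by rw [heq]; exact hbf)

-- ===== VERDICT (by name: the statement is the Claim_ definition above) =====
theorem compare_usage_spec : Claim_unchanged_compare_usage := by
  intro v a _ hnd
  exact main v a hnd

theorem compare_usage_changed : Claim_changed_compare_usage := by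
  unfold Claim_changed_compare_usage; decide

theorem compare_usage_tight : Claim_exact_compare_usage := by
  intro v a _ hd
  exact tight v a hd
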